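-- pv_equiv track=rewrite | github.com/cbadil12/monthly-sales-analyzer-project | monthly_sales_analyzer.py | get_sales_range_by_product
-- ===== SOURCE A (Python) =====
-- def get_sales_range_by_product(data, product_key):
--     """Calculates the sales range (max-min) of a specific product."""
--     first_day = data[0]
--     product_max = first_day[product_key]
--     product_min= first_day[product_key]
--     for i in data:
--         product_daily_sales=i[product_key]
--         if product_daily_sales>product_max:
--             product_max = product_daily_sales
--         if product_daily_sales<product_min:
--             product_min = product_daily_sales
--     sales_range=product_max-product_min
--     return str(sales_range) + " sales"
-- ===== SOURCE B (Python) =====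
-- def get_sales_range_by_product(data, product_key):
--     """Calculates the sales range (max-min) of a specific product."""
--     vals = sorted(row[product_key] for row in data)
--     return str(vals[-1] - vals[0]) + " sales"
-- ===== Notes on version B (the rewrite author's own statement) =====
-- stated objective: alternative
-- what changed: Replaces the fused running-max/running-min scan seeded from data[0] by sorting the projected per-row values and taking the range as last-sorted minus first-sorted element.
import Mathlib
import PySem

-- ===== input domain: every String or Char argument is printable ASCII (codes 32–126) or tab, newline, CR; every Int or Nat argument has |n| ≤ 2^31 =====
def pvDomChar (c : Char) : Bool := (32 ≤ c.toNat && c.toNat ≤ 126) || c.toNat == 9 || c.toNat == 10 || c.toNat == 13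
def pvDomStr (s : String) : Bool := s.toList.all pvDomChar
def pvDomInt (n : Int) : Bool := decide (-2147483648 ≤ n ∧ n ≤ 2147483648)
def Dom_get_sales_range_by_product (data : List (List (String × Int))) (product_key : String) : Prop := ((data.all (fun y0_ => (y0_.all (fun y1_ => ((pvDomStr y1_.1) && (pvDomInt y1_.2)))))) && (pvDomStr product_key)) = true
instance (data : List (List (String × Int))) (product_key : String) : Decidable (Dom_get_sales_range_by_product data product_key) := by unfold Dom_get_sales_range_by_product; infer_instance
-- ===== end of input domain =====

-- B is an 'alternative' algorithm: it sorts the projected per-row values and reads the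
-- range off the sorted list's endpoints, instead of A's fused running-max/running-min
-- loop seeded from data[0]. Both programs raise on inputs outside Pre_ (empty data:
-- IndexError in both; a row missing the key: KeyError in both), so nothing is claimed there.

-- ===== PORT A =====
-- row[product_key]: first-match lookup in the association list (Python dict access)
def pvRowGet? (row : List (String × Int)) (k : String) : Option Int := row.lookup k

def get_sales_range_by_product (data : List (List (String × Int))) (product_key : String) : String :=
  match data with
  | [] => ""        -- data[0] raises IndexError; excluded by Pre_
  | first_day :: _ =>
    match pvRowGet? first_day product_key with
    | none => ""    -- KeyError; excluded by Pre_
    | some v0 =>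
      -- for i in data: two if-updates on the running (max, min) pair
      let st := data.foldl (fun (s : Int × Int) i =>
        match pvRowGet? i product_key with
        | none => s  -- KeyError mid-loop; excluded by Pre_
        | some x => (if x > s.1 then x else s.1, if x < s.2 then x else s.2)) (v0, v0)
      PySem.Int.toStr (st.1 - st.2) ++ " sales"

-- ===== PORT B =====
def get_sales_range_by_product_alt (data : List (List (String × Int))) (product_key : String) : String :=
  -- vals = sorted(row[product_key] for row in data)  (getD 0 is unreachable under Pre_)
  let vals : List Int :=
    PySem.List.sorted (data.map (fun row => (pvRowGet? row product_key).getD 0)) (fun x => x) false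
  -- vals[-1] - vals[0]
  match PySem.List.pyGet? vals (-1), PySem.List.pyGet? vals 0 with
  | some mx, some mn => PySem.Int.toStr (mx - mn) ++ " sales"
  | _, _ => ""      -- vals[-1] on the empty list: IndexError; excluded by Pre_

-- ===== PRECONDITION & SPEC =====
-- Pre_ excludes exactly the inputs where A raises: empty data (IndexError) and rows
-- lacking product_key (KeyError).
def Pre_get_sales_range_by_product (data : List (List (String × Int))) (product_key : String) : Prop :=
  data ≠ [] ∧ ∀ row ∈ data, (row.any (fun p => p.1 == product_key)) = true
instance (data : List (List (String × Int))) (product_key : String) : Decidable (Pre_get_sales_range_by_product data product_key) := by unfold Pre_get_sales_range_by_product; infer_instance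

def pvWitness_get_sales_range_by_product : (List (List (String × Int))) × String :=
  ([[("a", 3), ("b", 1)], [("a", 7)], [("a", 2)]], "a")

def Spec_get_sales_range_by_product (data : List (List (String × Int))) (product_key : String) (out : String) : Prop := out = get_sales_range_by_product_alt data product_key
instance (data : List (List (String × Int))) (product_key : String) (out : String) : Decidable (Spec_get_sales_range_by_product data product_key out) := by unfold Spec_get_sales_range_by_product; infer_instance

-- ===== CLAIM (what is proved, stated in full; the proofs are below) =====
def Claim_equal_get_sales_range_by_product : Prop := ∀ (data : List (List (String × Int))) (product_key : String), Dom_get_sales_range_by_product data product_key → Pre_get_sales_range_by_product data product_key → Spec_get_sales_range_by_product data product_key (get_sales_range_by_product data product_key)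

-- ===== LEMMAS AND PROOFS =====

-- a fold whose body agrees on the list's members can be replaced
theorem pvFoldlCongr {α β : Type} (l : List α) (f g : β → α → β) (init : β)
    (h : ∀ x ∈ l, ∀ acc, f acc x = g acc x) : l.foldl f init = l.foldl g init := by
  induction l generalizing init with
  | nil => rfl
  | cons a t ih =>
    simp only [List.foldl_cons, h a (by simp)]
    exact ih _ (fun x hx acc => h x (List.mem_cons_of_mem a hx) acc)

-- a row containing the key has a successful lookup
theorem pvRowGet?_isSome (row : List (String × Int)) (k : String)
    (h : row.any (fun p => p.1 == k) = true) : ∃ v, pvRowGet? row k = some v := by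
  induction row with
  | nil => simp at h
  | cons p t ih =>
    by_cases hk : k = p.1
    · exact ⟨p.2, by simp [pvRowGet?, List.lookup, hk]⟩
    · have h' : (t.any fun q => q.1 == k) = true := by
        simp only [List.any_cons, Bool.or_eq_true, beq_iff_eq] at h
        rcases h with h | h
        · exact absurd h.symm hk
        · exact h
      obtain ⟨v, hv⟩ := ih h'
      have hkb : (k == p.1) = false := by simpa using hk
      exact ⟨v, by simpa [pvRowGet?, List.lookup, hkb] using hv⟩

-- foldl max is a member of the seeded list …
theorem pvFoldlMax_mem (l : List Int) (v : Int) : l.foldl max v ∈ v :: l := by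
  induction l generalizing v with
  | nil => simp
  | cons a t ih =>
    simp only [List.foldl_cons]
    rcases List.mem_cons.1 (ih (max v a)) with h | h
    · rcases max_choice v a with hm | hm <;> rw [hm] at h ⊢ <;> simp [h]
    · simp [List.mem_cons, Or.inr (Or.inr h)]

-- … and bounds all of them
theorem pvFoldlMax_ge (l : List Int) (v : Int) : ∀ y ∈ v :: l, y ≤ l.foldl max v := by
  induction l generalizing v with
  | nil => simp
  | cons a t ih =>
    intro y hy
    simp only [List.foldl_cons]
    rw [List.mem_cons, List.mem_cons] at hy
    rcases hy with rfl | rfl | hy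
    · exact le_trans (le_max_left y a) (ih _ _ (by simp))
    · exact le_trans (le_max_right v y) (ih _ _ (by simp))
    · exact ih _ y (by simp [hy])

theorem pvFoldlMin_mem (l : List Int) (v : Int) : l.foldl min v ∈ v :: l := by
  induction l generalizing v with
  | nil => simp
  | cons a t ih =>
    simp only [List.foldl_cons]
    rcases List.mem_cons.1 (ih (min v a)) with h | h
    · rcases min_choice v a with hm | hm <;> rw [hm] at h ⊢ <;> simp [h]
    · simp [List.mem_cons, Or.inr (Or.inr h)]

theorem pvFoldlMin_le (l : List Int) (v : Int) : ∀ y ∈ v :: l, l.foldl min v ≤ y := by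
  induction l generalizing v with
  | nil => simp
  | cons a t ih =>
    intro y hy
    simp only [List.foldl_cons]
    rw [List.mem_cons, List.mem_cons] at hy
    rcases hy with rfl | rfl | hy
    · exact le_trans (ih _ _ (by simp)) (min_le_left y a)
    · exact le_trans (ih _ _ (by simp)) (min_le_right v y)
    · exact ih _ y (by simp [hy])

-- in a (≤)-pairwise list the last element bounds every member
theorem pvPairwise_le_getLast (l : List Int) (hp : l.Pairwise (· ≤ ·)) (hne : l ≠ []) :
    ∀ y ∈ l, y ≤ l.getLast hne := by
  induction l with
  | nil => simp at hne
  | cons a t ih =>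
    intro y hy
    cases t with
    | nil => simp_all
    | cons b u =>
      rw [List.mem_cons] at hy
      rcases hy with rfl | hy
      · have := List.rel_of_pairwise_cons hp (l := b :: u) (a' := (b :: u).getLast (by simp))
          (List.getLast_mem _)
        simpa [List.getLast_cons] using this
      · have := ih hp.of_cons (by simp) y hy
        simpa [List.getLast_cons] using this

theorem get_sales_range_by_product_spec : Claim_equal_get_sales_range_by_product := by
  intro data product_key _ hpre
  obtain ⟨hne, hall⟩ := hpre
  unfold Spec_get_sales_range_by_product
  match data, hne with
  | first :: rest, _ =>
    obtain ⟨v0, hv0⟩ := pvRowGet?_isSome first product_key (hall first (by simp))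
    set vOf : List (String × Int) → Int := fun row => (pvRowGet? row product_key).getD 0 with hvOf
    have hv0' : vOf first = v0 := by simp [hvOf, hv0]
    -- A's loop body, rewritten as max/min on the projected value
    have hbody : ∀ i ∈ first :: rest, ∀ (s : Int × Int),
        (match pvRowGet? i product_key with
         | none => s
         | some x => (if x > s.1 then x else s.1, if x < s.2 then x else s.2))
        = (max s.1 (vOf i), min s.2 (vOf i)) := by
      intro i hi s
      obtain ⟨x, hx⟩ := pvRowGet?_isSome i product_key (hall i hi)
      simp only [hx, hvOf, Option.getD_some, Prod.mk.injEq]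
      constructor <;> (split <;> omega)
    have hfoldA :
        (first :: rest).foldl (fun (s : Int × Int) i =>
          match pvRowGet? i product_key with
          | none => s
          | some x => (if x > s.1 then x else s.1, if x < s.2 then x else s.2)) (v0, v0)
        = ((rest.map vOf).foldl max v0, (rest.map vOf).foldl min v0) := by
      rw [pvFoldlCongr (first :: rest) _ (fun s i => (max s.1 (vOf i), min s.2 (vOf i))) (v0, v0) hbody,
          ← List.foldl_map (f := vOf) (g := fun (s : Int × Int) x => (max s.1 x, min s.2 x))]
      simp only [List.map_cons, List.foldl_cons, hv0', max_self, min_self]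
      exact PySem.List.foldl_prod_mk (f := max) (g := min) _ _ _
    -- the projected values and their sorted rearrangement
    have hvalsc : (first :: rest).map vOf = v0 :: rest.map vOf := by simp [hv0']
    obtain ⟨m, t, hsm⟩ : ∃ m t,
        PySem.List.sorted ((first :: rest).map vOf) (fun x => x) false = m :: t := by
      cases h : PySem.List.sorted ((first :: rest).map vOf) (fun x => x) false with
      | nil =>
        exfalso
        have := (PySem.List.sorted_eq_nil_iff
          (xs := (first :: rest).map vOf) (key := fun x => x) (rev := false)).1 h
        simp at this
      | cons m t => exact ⟨m, t, rfl⟩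
    have hperm : (m :: t).Perm ((first :: rest).map vOf) := by
      rw [← hsm]; exact PySem.List.sorted_perm ..
    have hpw : (m :: t).Pairwise (fun a b => a ≤ b) := by
      have := PySem.List.sorted_pairwise (xs := (first :: rest).map vOf) (key := fun x => x)
      rw [hsm] at this; exact this
    -- head of the sorted list = A's running min
    have hminA : (rest.map vOf).foldl min v0 ∈ v0 :: rest.map vOf := pvFoldlMin_mem _ _
    have hminB : m ∈ v0 :: rest.map vOf := by
      rw [← hvalsc]; exact hperm.mem_iff.1 (by simp)
    have hmin : (rest.map vOf).foldl min v0 = m := by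
      have h1 : (rest.map vOf).foldl min v0 ≤ m := pvFoldlMin_le _ _ m hminB
      have h2 : m ≤ (rest.map vOf).foldl min v0 := by
        have hk := PySem.List.key_head_sorted_le (xs := (first :: rest).map vOf)
          (key := fun x => x) (m := m) (t := t) hsm
        exact hk _ (by rw [hvalsc]; exact hminA)
      omega
    -- last of the sorted list = A's running max
    have hlast? : PySem.List.pyGet? (m :: t) (-1) = some ((m :: t).getLast (by simp)) := by
      rw [PySem.List.pyGet?_neg_one, List.getLast?_eq_some_getLast]
    have hmaxA : (rest.map vOf).foldl max v0 ∈ v0 :: rest.map vOf := pvFoldlMax_mem _ _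
    have hlastmem : (m :: t).getLast (by simp) ∈ v0 :: rest.map vOf := by
      rw [← hvalsc]; exact hperm.mem_iff.1 (List.getLast_mem _)
    have hmax : (rest.map vOf).foldl max v0 = (m :: t).getLast (by simp) := by
      have h1 : (m :: t).getLast (by simp) ≤ (rest.map vOf).foldl max v0 :=
        pvFoldlMax_ge _ _ _ hlastmem
      have h2 : (rest.map vOf).foldl max v0 ≤ (m :: t).getLast (by simp) := by
        apply pvPairwise_le_getLast (m :: t) hpw (by simp)
        exact hperm.mem_iff.2 (by rw [hvalsc]; exact hmaxA)
      omega
    -- assemble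
    simp only [get_sales_range_by_product, get_sales_range_by_product_alt, hv0, hfoldA]
    rw [← hvOf, hsm, hlast?, PySem.List.pyGet?_zero_cons, hmin, hmax]

-- ===== VERDICT (by name: the statement is the Claim_ definition above) =====
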